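-- pv_equiv track=rewrite | github.com/robastel/fantasy_football_ingestion | src/utils.py | get_data_types
-- ===== SOURCE A (Python) =====
-- def get_data_types(key_map, data_types=None):
--     if data_types is None:
--         data_types = dict()
--     for k in key_map:
--         if isinstance(key_map[k], dict) and not key_map[k].get("data_type"):
--             get_data_types(key_map[k], data_types=data_types)
--         else:
--             data_types[key_map[k].get("col_name", k)] = key_map[k][
--                 "data_type"
--             ].upper()
--     return data_types
-- ===== SOURCE B (Python) =====
-- def get_data_types(key_map, data_types=None):
--     def leaves(node):
--         for k, v in node.items():
--             if isinstance(v, dict) and not v.get("data_type"):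
--                 yield from leaves(v)
--             else:
--                 yield v.get("col_name", k), v["data_type"].upper()
--
--     if data_types is None:
--         data_types = dict()
--     data_types.update(leaves(key_map))
--     return data_types
-- ===== Notes on version B (the rewrite author's own statement) =====
-- stated objective: simpler
-- what changed: Replaces A's mutate-the-dict-as-you-recurse loop by a recursive generator that yields the (col_name, DATA_TYPE) leaf pairs, applied in one bulk dict.update.
import Mathlib
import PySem

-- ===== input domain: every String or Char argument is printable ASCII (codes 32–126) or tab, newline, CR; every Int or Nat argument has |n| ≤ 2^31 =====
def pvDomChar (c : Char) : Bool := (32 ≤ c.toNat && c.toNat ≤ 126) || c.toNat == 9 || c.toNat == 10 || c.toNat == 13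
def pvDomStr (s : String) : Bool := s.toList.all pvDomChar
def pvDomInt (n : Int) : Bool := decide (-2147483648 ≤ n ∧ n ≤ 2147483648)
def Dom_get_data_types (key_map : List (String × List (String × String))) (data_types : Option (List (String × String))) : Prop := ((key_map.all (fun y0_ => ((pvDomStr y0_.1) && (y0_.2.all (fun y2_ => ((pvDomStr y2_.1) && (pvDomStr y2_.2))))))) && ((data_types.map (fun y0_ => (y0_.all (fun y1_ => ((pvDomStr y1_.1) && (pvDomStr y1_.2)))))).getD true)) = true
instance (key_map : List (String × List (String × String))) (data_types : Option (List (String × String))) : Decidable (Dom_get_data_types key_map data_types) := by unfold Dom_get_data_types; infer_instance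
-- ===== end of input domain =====

-- B replaces A's mutate-as-you-recurse loop by a recursive generator of (col_name, TYPE) pairs fed to
-- one bulk dict.update (objective: simpler).  Both mutate the data_types dict passed in (A by item
-- assignment, B by dict.update), so the side effect matches; the theorems are about the return value.

-- ===== PORT A =====
-- Python's recursive call get_data_types(key_map[k], data_types) fires when the inner dict has no
-- (truthy) "data_type"; at this flattened type every value of the inner dict is a String, so that
-- recursive call raises on its first key (a string has no .get) — those inputs are excluded by Pre_.
-- Only an empty inner dict returns normally from the recursion, leaving the accumulator unchanged,
-- which is what this helper returns (exact on Pre_).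
def getDataTypesRec (_d : List (String × String)) (acc : PySem.Dict String String) : PySem.Dict String String :=
  acc

def get_data_types (key_map : List (String × List (String × String))) (data_types : Option (List (String × String))) : List (String × String) :=
  -- data_types = dict() if None; for k in key_map: …
  (key_map.foldl (fun acc kd =>
      -- isinstance(key_map[k], dict) is always true at this type; 'not key_map[k].get("data_type")'
      -- holds iff the key is missing or its value is the empty string
      if PySem.Dict.getD (⟨kd.2⟩ : PySem.Dict String String) "data_type" "" = "" then
        getDataTypesRec kd.2 acc
      else
        acc.insert (PySem.Dict.getD (⟨kd.2⟩ : PySem.Dict String String) "col_name" kd.1)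
                   (PySem.Str.upper (PySem.Dict.getD (⟨kd.2⟩ : PySem.Dict String String) "data_type" "")))
    (⟨data_types.getD []⟩ : PySem.Dict String String)).items

-- ===== PORT B =====
-- 'yield from leaves(v)' on an inner dict: at this flattened type its values are Strings, so a
-- non-empty inner dict raises on its first key (excluded by Pre_); an empty one yields nothing,
-- which is what this helper returns (exact on Pre_).
def leavesInner (_d : List (String × String)) : List (String × String) :=
  []

-- one step of the generator 'leaves': the list of pairs yielded for the entry (k, v)
def leavesStep (kd : String × List (String × String)) : List (String × String) :=
  match PySem.Dict.get? (⟨kd.2⟩ : PySem.Dict String String) "data_type" with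
  | none => leavesInner kd.2        -- missing data_type: falsy → yield from leaves(v)
  | some t =>
    if t = "" then leavesInner kd.2 -- empty-string data_type: falsy → yield from leaves(v)
    else [(PySem.Dict.getD (⟨kd.2⟩ : PySem.Dict String String) "col_name" kd.1, PySem.Str.upper t)]

def get_data_types_alt (key_map : List (String × List (String × String))) (data_types : Option (List (String × String))) : List (String × String) :=
  -- data_types = dict() if None; data_types.update(leaves(key_map)); return data_types
  (PySem.Dict.update (⟨data_types.getD []⟩ : PySem.Dict String String)
      (key_map.flatMap leavesStep)).items

-- ===== PRECONDITION & SPEC =====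
-- Pre_ excludes exactly the inputs on which the Python A raises (AttributeError): a non-empty inner
-- dict whose "data_type" is missing or empty makes A recurse into it and call .get on its string
-- values (B raises on the same inputs, inside its generator).
def Pre_get_data_types (key_map : List (String × List (String × String))) (data_types : Option (List (String × String))) : Prop :=
  ∀ kd ∈ key_map, kd.2 = [] ∨ PySem.Dict.getD (⟨kd.2⟩ : PySem.Dict String String) "data_type" "" ≠ ""
instance (key_map : List (String × List (String × String))) (data_types : Option (List (String × String))) : Decidable (Pre_get_data_types key_map data_types) := by unfold Pre_get_data_types; infer_instance

def pvWitness_get_data_types : (List (String × List (String × String))) × (Option (List (String × String))) :=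
  ([("a", [("data_type", "int")]), ("b", [("col_name", "bb"), ("data_type", "str")]), ("c", [])], some [("z", "Z")])

def Spec_get_data_types (key_map : List (String × List (String × String))) (data_types : Option (List (String × String))) (out : List (String × String)) : Prop := out = get_data_types_alt key_map data_types
instance (key_map : List (String × List (String × String))) (data_types : Option (List (String × String))) (out : List (String × String)) : Decidable (Spec_get_data_types key_map data_types out) := by unfold Spec_get_data_types; infer_instance

-- ===== CLAIM (what is proved, stated in full; the proofs are below) =====
def Claim_equal_get_data_types : Prop := ∀ (key_map : List (String × List (String × String))) (data_types : Option (List (String × String))), Dom_get_data_types key_map data_types → Pre_get_data_types key_map data_types → Spec_get_data_types key_map data_types (get_data_types key_map data_types)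

-- ===== LEMMAS AND PROOFS =====

-- A's loop over the remaining keys equals folding inserts of the concatenated generator output,
-- for any accumulator.
lemma get_data_types_loop_eq (km : List (String × List (String × String))) :
    ∀ acc : PySem.Dict String String,
      km.foldl (fun acc kd =>
        if PySem.Dict.getD (⟨kd.2⟩ : PySem.Dict String String) "data_type" "" = "" then
          getDataTypesRec kd.2 acc
        else
          acc.insert (PySem.Dict.getD (⟨kd.2⟩ : PySem.Dict String String) "col_name" kd.1)
                     (PySem.Str.upper (PySem.Dict.getD (⟨kd.2⟩ : PySem.Dict String String) "data_type" ""))) acc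
      = (km.flatMap leavesStep).foldl (fun d kv => d.insert kv.1 kv.2) acc := by
  induction km with
  | nil => intro acc; rfl
  | cons kd rest ih =>
    intro acc
    simp only [List.foldl_cons, List.flatMap_cons, List.foldl_append]
    have hstep :
        (if PySem.Dict.getD (⟨kd.2⟩ : PySem.Dict String String) "data_type" "" = "" then
          getDataTypesRec kd.2 acc
        else
          acc.insert (PySem.Dict.getD (⟨kd.2⟩ : PySem.Dict String String) "col_name" kd.1)
                     (PySem.Str.upper (PySem.Dict.getD (⟨kd.2⟩ : PySem.Dict String String) "data_type" "")))
        = (leavesStep kd).foldl (fun d kv => d.insert kv.1 kv.2) acc := by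
      unfold leavesStep
      cases hg : PySem.Dict.get? (⟨kd.2⟩ : PySem.Dict String String) "data_type" with
      | none =>
        have : PySem.Dict.getD (⟨kd.2⟩ : PySem.Dict String String) "data_type" "" = "" := by
          simp [PySem.Dict.getD, hg]
        simp [this, getDataTypesRec, leavesInner]
      | some t =>
        have hd : PySem.Dict.getD (⟨kd.2⟩ : PySem.Dict String String) "data_type" "" = t := by
          simp [PySem.Dict.getD, hg]
        by_cases ht : t = ""
        · subst ht; simp [hd, getDataTypesRec, leavesInner]
        · simp [hd, ht, List.foldl_cons]
    rw [hstep, ih]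

-- ===== VERDICT (by name: the statement is the Claim_ definition above) =====
theorem get_data_types_spec : Claim_equal_get_data_types := by
  intro key_map data_types _ _
  unfold Spec_get_data_types get_data_types get_data_types_alt
  rw [get_data_types_loop_eq key_map]
  rfl
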